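-- pv_equiv track=rewrite | github.com/EMPS-2025/EM_SparkTest | utils/formatters.py | label_hour_ranges
-- ===== SOURCE A (Python) =====
-- from typing import List, Tuple, Optional
--
-- def format_time_hhmm(total_minutes: int) -> str:
--     """Format minutes as HH:MM (24:00 for end of day)."""
--     if total_minutes == 24 * 60:
--         return "24:00"
--     h = (total_minutes // 60) % 24
--     m = total_minutes % 60
--     return f"{h:02d}:{m:02d}"
--
-- def compress_ranges(indices: List[int]) -> List[Tuple[int, int]]:
--     """Compress list of indices into contiguous ranges.
--
--     Example: [1, 2, 3, 5, 6, 8] → [(1, 3), (5, 6), (8, 8)]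
--     """
--     if not indices:
--         return []
--
--     sorted_unique = sorted(set(indices))
--     ranges = []
--     start = prev = sorted_unique[0]
--
--     for current in sorted_unique[1:]:
--         if current == prev + 1:
--             prev = current
--         else:
--             ranges.append((start, prev))
--             start = prev = current
--
--     ranges.append((start, prev))
--     return ranges
--
-- def label_hour_ranges(hours: List[int]) -> Tuple[str, str, int]:
--     """Convert hour list to time labels and count.
--
--     Returns: (time_label, index_label, total_hours)
--     Example: ([1, 2, 3, 6, 7]) → ("00:00–03:00 + 05:00–07:00", "1–3, 6–7", 5)
--     """
--     ranges = compress_ranges(hours)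
--
--     time_parts = [
--         f"{format_time_hhmm((s-1)*60)}–{format_time_hhmm(e*60)}"
--         for s, e in ranges
--     ]
--
--     idx_parts = [
--         f"{s}–{e}" if s != e else f"{s}"
--         for s, e in ranges
--     ]
--
--     total_count = sum(e - s + 1 for s, e in ranges)
--
--     return " + ".join(time_parts), ", ".join(idx_parts), total_count
-- ===== SOURCE B (Python) =====
-- def _hhmm(tm):
--     if tm == 1440:
--         return "24:00"
--     h, m = divmod(tm, 60)
--     return f"{h % 24:02d}:{m:02d}"
--
-- def label_hour_ranges(hours):
--     # Hash-set consecutive-run detection: no sort of the full data; a run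
--     # starts at h iff h-1 is absent from the set, and each run is extended
--     # by membership probes; only the run starts are sorted.
--     present = set(hours)
--     starts = sorted(h for h in present if h - 1 not in present)
--     time_parts, idx_parts = [], []
--     for s in starts:
--         e = s
--         while e + 1 in present:
--             e += 1
--         time_parts.append(f"{_hhmm((s - 1) * 60)}\u2013{_hhmm(e * 60)}")
--         idx_parts.append(f"{s}\u2013{e}" if s != e else f"{s}")
--     return " + ".join(time_parts), ", ".join(idx_parts), len(present)
-- ===== Notes on version B (the rewrite author's own statement) =====
-- stated objective: alternative
-- what changed: B replaces A's sort-the-whole-set-then-linear-run-scan (compress_ranges with a start/prev accumulator plus three later passes over the ranges list) by the hash-set consecutive-sequence algorithm: build set(hours), find run starts as the members h with h-1 absent, sort only those starts, and extend each start by repeated membership probes, emitting both labels inside that one loop; the count is len(set(hours)) instead of a sum of run widths.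
import Mathlib
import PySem

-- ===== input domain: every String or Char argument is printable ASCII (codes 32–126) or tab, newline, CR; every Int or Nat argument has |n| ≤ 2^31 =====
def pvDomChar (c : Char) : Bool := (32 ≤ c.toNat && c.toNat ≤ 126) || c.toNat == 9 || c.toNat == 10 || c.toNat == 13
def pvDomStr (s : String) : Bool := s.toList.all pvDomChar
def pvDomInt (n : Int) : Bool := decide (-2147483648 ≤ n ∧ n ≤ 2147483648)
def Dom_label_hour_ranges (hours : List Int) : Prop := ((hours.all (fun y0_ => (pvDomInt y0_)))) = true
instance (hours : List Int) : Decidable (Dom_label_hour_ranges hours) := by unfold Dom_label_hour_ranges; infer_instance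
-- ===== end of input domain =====

-- B replaces A's sort-then-run-scan by the hash-set consecutive-sequence method:
-- run starts are the members h of set(hours) with h-1 absent; only starts are sorted,
-- runs are extended by membership probes, and the count is len(set(hours)) (objective: alternative).

-- ===== PORT A =====
-- format_time_hhmm
def pvFmtA (tm : Int) : String :=
  if tm == 24 * 60 then "24:00"
  else
    let h := PySem.Int.mod (PySem.Int.floordiv tm 60) 24
    let m := PySem.Int.mod tm 60
    PySem.Str.zfill (PySem.Int.toStr h) 2 ++ ":" ++ PySem.Str.zfill (PySem.Int.toStr m) 2

-- the body of compress_ranges' for-loop, as a fold step over (ranges, start, prev)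
def pvStepA (st : List (Int × Int) × Int × Int) (current : Int) : List (Int × Int) × Int × Int :=
  if current == st.2.2 + 1 then (st.1, st.2.1, current)
  else (st.1 ++ [(st.2.1, st.2.2)], current, current)

-- compress_ranges
def pvCompress (indices : List Int) : List (Int × Int) :=
  if indices == [] then []
  else
    match PySem.List.sorted (PySem.Set.ofList indices) (fun x => x) false with
    | [] => []  -- unreachable (indices nonempty); totality guard only
    | a :: rest =>
      let r := rest.foldl pvStepA ([], a, a)
      r.1 ++ [(r.2.1, r.2.2)]

def label_hour_ranges (hours : List Int) : String × String × Int :=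
  let ranges := pvCompress hours
  let time_parts := ranges.map (fun se => pvFmtA ((se.1 - 1) * 60) ++ "–" ++ pvFmtA (se.2 * 60))
  let idx_parts := ranges.map (fun se =>
    if se.1 != se.2 then PySem.Int.toStr se.1 ++ "–" ++ PySem.Int.toStr se.2
    else PySem.Int.toStr se.1)
  let total_count := ranges.foldl (fun acc se => acc + (se.2 - se.1 + 1)) 0
  (PySem.Str.join " + " time_parts, PySem.Str.join ", " idx_parts, total_count)

-- ===== PORT B =====
-- _hhmm
def pvFmtB (tm : Int) : String :=
  if tm == 1440 then "24:00"
  else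
    let h := PySem.Int.floordiv tm 60
    let m := PySem.Int.mod tm 60
    PySem.Str.zfill (PySem.Int.toStr (PySem.Int.mod h 24)) 2 ++ ":" ++ PySem.Str.zfill (PySem.Int.toStr m) 2

-- 'while e + 1 in present: e += 1'; fuel is a totality guard only: each successful
-- probe moves e to a distinct member of present, so present.length steps always suffice
def pvRunE (present : List Int) : Nat → Int → Int
  | 0, e => e
  | fuel + 1, e => if PySem.Set.contains present (e + 1) then pvRunE present fuel (e + 1) else e

def label_hour_ranges_alt (hours : List Int) : String × String × Int :=
  let present := PySem.Set.ofList hours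
  let starts := PySem.List.sorted
    (present.filter (fun h => !(PySem.Set.contains present (h - 1)))) (fun x => x) false
  let parts := starts.foldl (fun acc s =>
    let e := pvRunE present present.length s
    (acc.1 ++ [pvFmtB ((s - 1) * 60) ++ "–" ++ pvFmtB (e * 60)],
     acc.2 ++ [if s != e then PySem.Int.toStr s ++ "–" ++ PySem.Int.toStr e
               else PySem.Int.toStr s])) ([], [])
  (PySem.Str.join " + " parts.1, PySem.Str.join ", " parts.2, (present.length : Int))

-- ===== PRECONDITION & SPEC =====
def Spec_label_hour_ranges (hours : List Int) (out : String × String × Int) : Prop := out = label_hour_ranges_alt hours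
instance (hours : List Int) (out : String × String × Int) : Decidable (Spec_label_hour_ranges hours out) := by unfold Spec_label_hour_ranges; infer_instance

-- ===== CLAIM (what is proved, stated in full; the proofs are below) =====
def Claim_equal_label_hour_ranges : Prop := ∀ (hours : List Int), Dom_label_hour_ranges hours → Spec_label_hour_ranges hours (label_hour_ranges hours)

-- ===== LEMMAS AND PROOFS =====

-- the run decomposition A computes, from current run (s, p) and the remaining elements
def genRuns : Int → Int → List Int → List (Int × Int)
  | s, p, [] => [(s, p)]
  | s, p, x :: xs => if x = p + 1 then genRuns s x xs else (s, p) :: genRuns x x xs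

theorem genRuns_cons_eq {x p : Int} (s : Int) (xs : List Int) (h : x = p + 1) :
    genRuns s p (x :: xs) = genRuns s x xs := by
  simp [genRuns, h]

theorem genRuns_cons_ne {x p : Int} (s : Int) (xs : List Int) (h : x ≠ p + 1) :
    genRuns s p (x :: xs) = (s, p) :: genRuns x x xs := by
  simp [genRuns, h]

theorem pvFmtA_eq_pvFmtB : pvFmtA = pvFmtB := by
  funext tm
  simp [pvFmtA, pvFmtB]

theorem foldlA_genRuns : ∀ (l : List Int) (acc : List (Int × Int)) (s p : Int),
    (l.foldl pvStepA (acc, s, p)).1 ++ [((l.foldl pvStepA (acc, s, p)).2.1, (l.foldl pvStepA (acc, s, p)).2.2)]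
      = acc ++ genRuns s p l
  | [], acc, s, p => by simp [genRuns]
  | x :: xs, acc, s, p => by
    by_cases h : x = p + 1
    · subst h
      simp only [List.foldl, pvStepA, BEq.rfl, if_true]
      rw [foldlA_genRuns xs acc s (p + 1)]
      simp [genRuns]
    · simp only [List.foldl, pvStepA]
      rw [if_neg (by simpa using h)]
      rw [foldlA_genRuns xs (acc ++ [(s, p)]) x x]
      simp [genRuns, h]

theorem sum_genRuns : ∀ (l : List Int) (s p a : Int),
    (genRuns s p l).foldl (fun acc se => acc + (se.2 - se.1 + 1)) a
      = a + (p - s + 1) + l.length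
  | [], s, p, a => by simp [genRuns]
  | x :: xs, s, p, a => by
    by_cases h : x = p + 1
    · simp only [genRuns, h, if_true]
      rw [sum_genRuns xs]
      simp
      omega
    · simp only [genRuns, if_neg h, List.foldl]
      rw [sum_genRuns xs]
      simp
      omega

theorem set_ofList_ne_nil {x : Int} {xs : List Int} : PySem.Set.ofList (x :: xs) ≠ ([] : List Int) := by
  intro h
  have : x ∈ PySem.Set.ofList (x :: xs) := (PySem.Set.mem_ofList _ _).mpr List.mem_cons_self
  rw [h] at this
  exact (List.not_mem_nil) this

-- one unfolding step of the while loop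
theorem pvRunE_succ (m : List Int) (fuel : Nat) (e : Int) :
    pvRunE m (fuel + 1) e = if e + 1 ∈ m then pvRunE m fuel (e + 1) else e := by
  simp [pvRunE, PySem.Set.contains_eq_listContains]

-- pvRunE only consults membership
theorem pvRunE_ext : ∀ (m m' : List Int), (∀ x, x ∈ m ↔ x ∈ m') →
    ∀ (fuel : Nat) (e : Int), pvRunE m fuel e = pvRunE m' fuel e := by
  intro m m' hmm fuel
  induction fuel with
  | zero => intro e; rfl
  | succ n ih =>
    intro e
    rw [pvRunE_succ, pvRunE_succ]
    rw [if_congr (hmm (e + 1)) (ih (e + 1)) rfl]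

-- dropping a head below the probe range does not change pvRunE
theorem pvRunE_cons_lt : ∀ (fuel : Nat) (a e : Int), a ≤ e → ∀ (t : List Int),
    pvRunE (a :: t) fuel e = pvRunE t fuel e := by
  intro fuel
  induction fuel with
  | zero => intro a e _ t; rfl
  | succ n ih =>
    intro a e hae t
    rw [pvRunE_succ, pvRunE_succ]
    have hiff : e + 1 ∈ a :: t ↔ e + 1 ∈ t := by
      constructor
      · intro h
        rcases List.mem_cons.mp h with h | h
        · omega
        · exact h
      · exact List.mem_cons_of_mem a
    rw [if_congr hiff (ih a (e + 1) (by omega) t) rfl]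

theorem length_filter_lt_of_mem {e : Int} : ∀ (m : List Int), e + 1 ∈ m →
    (m.filter (fun x => decide (e + 1 < x))).length < (m.filter (fun x => decide (e < x))).length := by
  intro m hm
  induction m with
  | nil => exact absurd hm List.not_mem_nil
  | cons x t ih =>
    have hle : (t.filter (fun x => decide (e + 1 < x))).length ≤ (t.filter (fun x => decide (e < x))).length :=
      List.Sublist.length_le (List.monotone_filter_right t (by intro x hx; simp at hx ⊢; omega))
    by_cases hxe : x = e + 1
    · subst hxe
      simp only [List.filter_cons]
      have h2 : (e : Int) < e + 1 := by omega
      simp [h2]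
      omega
    · have hmt : e + 1 ∈ t := by
        rcases List.mem_cons.mp hm with h | h
        · exact absurd h.symm hxe
        · exact h
      have hs := ih hmt
      simp only [List.filter_cons]
      by_cases hx : e + 1 < x <;> by_cases h2 : e < x <;> simp [hx, h2] <;> omega

-- fuel stability: any fuel at least the number of members above e gives the same value
theorem pvRunE_fuel_ge : ∀ (fuel : Nat) (m : List Int) (e : Int),
    (m.filter (fun x => decide (e < x))).length ≤ fuel →
    pvRunE m fuel e = pvRunE m (fuel + 1) e := by
  intro fuel
  induction fuel with
  | zero =>
    intro m e h
    have hnm : e + 1 ∉ m := by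
      intro hmem
      have := length_filter_lt_of_mem m hmem
      omega
    rw [show pvRunE m 0 e = e from rfl, pvRunE_succ, if_neg hnm]
  | succ n ih =>
    intro m e h
    rw [pvRunE_succ, pvRunE_succ m (n + 1) e]
    by_cases hmem : e + 1 ∈ m
    · rw [if_pos hmem, if_pos hmem]
      exact ih m (e + 1) (by have := length_filter_lt_of_mem m hmem; omega)
    · rw [if_neg hmem, if_neg hmem]

theorem pvRunE_fuel_stable : ∀ (f1 f2 : Nat) (m : List Int) (e : Int),
    (m.filter (fun x => decide (e < x))).length ≤ f1 →
    (m.filter (fun x => decide (e < x))).length ≤ f2 →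
    pvRunE m f1 e = pvRunE m f2 e := by
  have mono : ∀ (d f : Nat) (m : List Int) (e : Int),
      (m.filter (fun x => decide (e < x))).length ≤ f →
      pvRunE m f e = pvRunE m (f + d) e := by
    intro d
    induction d with
    | zero => intro f m e _; rfl
    | succ k ih =>
      intro f m e h
      rw [ih f m e h, pvRunE_fuel_ge (f + k) m e (by omega),
        show f + k + 1 = f + (k + 1) by omega]
  intro f1 f2 m e h1 h2
  rcases Nat.le_total f1 f2 with h | h
  · obtain ⟨d, rfl⟩ := Nat.le.dest h
    exact mono d f1 m e h1
  · obtain ⟨d, rfl⟩ := Nat.le.dest h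
    exact (mono d f2 m e h2).symm

theorem filter_length_le {p : Int → Bool} (m : List Int) : (m.filter p).length ≤ m.length :=
  List.length_filter_le _ _

-- normalize pvRunE on a strictly larger tail: drop a low head and fix the fuel
theorem pvRunE_norm {a s : Int} (t : List Int) (hle : a ≤ s) :
    pvRunE (a :: t) (t.length + 1) s = pvRunE t t.length s := by
  rw [pvRunE_cons_lt (t.length + 1) a s hle t]
  exact pvRunE_fuel_stable (t.length + 1) t.length t s
    (Nat.le_trans (filter_length_le t) (Nat.le_succ _)) (filter_length_le t)

-- main characterization of A's run builder on a strictly increasing suffix,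
-- with all membership tests localized to the suffix
theorem genRuns_char : ∀ (l : List Int) (s p : Int), List.IsChain (· < ·) (p :: l) →
    genRuns s p l =
      (s, pvRunE l l.length p) ::
        (l.filter (fun y => !((y - 1 == p) || l.contains (y - 1)))).map
          (fun s' => (s', pvRunE l l.length s')) := by
  intro l
  induction l with
  | nil =>
    intro s p _
    simp [genRuns, pvRunE]
  | cons x t ih =>
    intro s p hch
    have hpx : p < x := (List.isChain_cons_cons.mp hch).1
    have hcht : List.IsChain (· < ·) (x :: t) := (List.isChain_cons_cons.mp hch).2
    have htgt : ∀ y ∈ t, x < y := fun y hy => List.IsChain.rel_cons hcht hy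
    have hmemloc : ∀ y ∈ t,
        (!((y - 1 == p) || (x :: t).contains (y - 1)))
          = (!((y - 1 == x) || t.contains (y - 1))) := by
      intro y hy
      have hyx : x < y := htgt y hy
      have h1 : ((y - 1 : Int) == p) = false := by
        rw [beq_eq_false_iff_ne]
        omega
      rw [h1, List.contains_cons, Bool.false_or]
    by_cases h : x = p + 1
    · -- run continues through x
      rw [genRuns_cons_eq s t h, ih s x hcht]
      have hrE : pvRunE (x :: t) (x :: t).length p = pvRunE t t.length x := by
        rw [List.length_cons, pvRunE_succ, if_pos (by rw [← h]; exact List.mem_cons_self),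
          show p + 1 = x from h.symm]
        exact pvRunE_cons_lt t.length x x (le_refl x) t
      have hfilt : ((x :: t).filter (fun y => !((y - 1 == p) || (x :: t).contains (y - 1))))
          = t.filter (fun y => !((y - 1 == x) || t.contains (y - 1))) := by
        rw [List.filter_cons]
        have hxdrop : (!((x - 1 == p) || (x :: t).contains (x - 1))) = false := by
          have h1 : ((x - 1 : Int) == p) = true := by rw [beq_iff_eq]; omega
          rw [h1, Bool.true_or, Bool.not_true]
        rw [hxdrop]
        simp only [Bool.false_eq_true, if_false]
        exact List.filter_congr hmemloc
      have hmap : List.map (fun s' => (s', pvRunE (x :: t) (x :: t).length s'))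
            (t.filter (fun y => !((y - 1 == x) || t.contains (y - 1))))
          = List.map (fun s' => (s', pvRunE t t.length s'))
            (t.filter (fun y => !((y - 1 == x) || t.contains (y - 1)))) := by
        apply List.map_congr_left
        intro s' hs'
        have hs't : s' ∈ t := List.mem_of_mem_filter hs'
        have hxs' : x < s' := htgt s' hs't
        rw [List.length_cons, pvRunE_norm t (by omega : x ≤ s')]
      rw [hrE, hfilt, hmap]
    · -- run breaks at x
      rw [genRuns_cons_ne s t h, ih x x hcht]
      have hrE : pvRunE (x :: t) (x :: t).length p = p := by
        rw [List.length_cons, pvRunE_succ, if_neg]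
        intro hmem
        rcases List.mem_cons.mp hmem with h' | h'
        · omega
        · have := htgt _ h'; omega
      have hfilt : ((x :: t).filter (fun y => !((y - 1 == p) || (x :: t).contains (y - 1))))
          = x :: t.filter (fun y => !((y - 1 == x) || t.contains (y - 1))) := by
        rw [List.filter_cons]
        have hxkeep : (!((x - 1 == p) || (x :: t).contains (x - 1))) = true := by
          have h1 : ((x - 1 : Int) == p) = false := by rw [beq_eq_false_iff_ne]; omega
          have hnm : (x - 1 : Int) ∉ x :: t := by
            intro h'
            rcases List.mem_cons.mp h' with h'' | h''
            · omega
            · have := htgt _ h''; omega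
          have h2 : (x :: t).contains (x - 1) = false := by simp [hnm]
          rw [h1, h2]
          rfl
        rw [hxkeep]
        simp only [if_true]
        exact congrArg (x :: ·) (List.filter_congr hmemloc)
      have hhead : pvRunE (x :: t) (x :: t).length x = pvRunE t t.length x := by
        rw [List.length_cons]
        exact pvRunE_norm t (le_refl x)
      have hmap : List.map (fun s' => (s', pvRunE (x :: t) (x :: t).length s'))
            (t.filter (fun y => !((y - 1 == x) || t.contains (y - 1))))
          = List.map (fun s' => (s', pvRunE t t.length s'))
            (t.filter (fun y => !((y - 1 == x) || t.contains (y - 1)))) := by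
        apply List.map_congr_left
        intro s' hs'
        have hs't : s' ∈ t := List.mem_of_mem_filter hs'
        have hxs' : x < s' := htgt s' hs't
        rw [List.length_cons, pvRunE_norm t (by omega : x ≤ s')]
      rw [hrE, hfilt, List.map_cons, hhead, hmap]

-- B's emit loop with the two list accumulators is two maps
theorem foldl_pair_append {α β γ : Type} (F : α → β) (G : α → γ) :
    ∀ (L : List α) (a1 : List β) (a2 : List γ),
    L.foldl (fun acc s => (acc.1 ++ [F s], acc.2 ++ [G s])) (a1, a2)
      = (a1 ++ L.map F, a2 ++ L.map G)
  | [], a1, a2 => by simp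
  | x :: xs, a1, a2 => by
    simp only [List.foldl, List.map_cons]
    rw [foldl_pair_append F G xs (a1 ++ [F x]) (a2 ++ [G x])]
    simp

-- ===== VERDICT (by name: the statement is the Claim_ definition above) =====
theorem label_hour_ranges_spec : Claim_equal_label_hour_ranges := by
  intro hours _
  unfold Spec_label_hour_ranges label_hour_ranges label_hour_ranges_alt pvCompress
  by_cases hnil : hours = []
  · subst hnil
    decide
  · rw [if_neg (by simpa using hnil)]
    rcases hsu : PySem.List.sorted (PySem.Set.ofList hours) (fun x => x) false with _ | ⟨a, rest⟩
    · exfalso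
      have h0 : PySem.Set.ofList hours = [] := (PySem.List.sorted_eq_nil_iff _ _ _).mp hsu
      cases hours with
      | nil => exact hnil rfl
      | cons x xs => exact set_ofList_ne_nil h0
    · have hperm : (a :: rest).Perm (PySem.Set.ofList hours) := by
        rw [← hsu]; exact PySem.List.sorted_perm _ _ _
      have hpair : (a :: rest).Pairwise (· < ·) := by
        rw [← hsu]; exact PySem.List.sorted_ofList_pairwise_lt (xs := hours)
      have halt : ∀ y ∈ rest, a < y := fun y hy => List.rel_of_pairwise_cons hpair hy
      have hmem : ∀ z, z ∈ PySem.Set.ofList hours ↔ z ∈ a :: rest :=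
        fun z => (hperm.mem_iff).symm
      have hcont : ∀ z, PySem.Set.contains (PySem.Set.ofList hours) z = (a :: rest).contains z := by
        intro z
        rw [PySem.Set.contains_eq_listContains]
        by_cases hz : z ∈ a :: rest
        · have h1 : z ∈ PySem.Set.ofList hours := (hmem z).mpr hz
          simp [hz, h1]
        · have h1 : z ∉ PySem.Set.ofList hours := fun h => hz ((hmem z).mp h)
          simp [hz, h1]
      have hlenP : (PySem.Set.ofList hours).length = rest.length + 1 := by
        have := hperm.length_eq
        simpa using this.symm
      -- B's run end equals the localized run end of genRuns_char
      have hend : ∀ s, a ≤ s →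
          pvRunE (PySem.Set.ofList hours) (PySem.Set.ofList hours).length s
            = pvRunE rest rest.length s := by
        intro s hs
        rw [pvRunE_ext (PySem.Set.ofList hours) (a :: rest) hmem, hlenP]
        exact pvRunE_norm rest hs
      -- B's start list is a :: the localized filter of genRuns_char
      have hstarts : PySem.List.sorted
            ((PySem.Set.ofList hours).filter
              (fun h => !(PySem.Set.contains (PySem.Set.ofList hours) (h - 1)))) (fun x => x) false
          = a :: rest.filter (fun y => !((y - 1 == a) || rest.contains (y - 1))) := by
        have hflt : (a :: rest).filter
              (fun h => !(PySem.Set.contains (PySem.Set.ofList hours) (h - 1)))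
            = a :: rest.filter (fun y => !((y - 1 == a) || rest.contains (y - 1))) := by
          rw [List.filter_cons]
          have hkeep : (!(PySem.Set.contains (PySem.Set.ofList hours) (a - 1))) = true := by
            have hnm : (a - 1 : Int) ∉ a :: rest := by
              intro h'
              rcases List.mem_cons.mp h' with h'' | h''
              · omega
              · have := halt _ h''; omega
            rw [hcont]
            simp [hnm]
          rw [hkeep]
          simp only [if_true]
          refine congrArg (a :: ·) (List.filter_congr ?_)
          intro y hy
          rw [hcont, List.contains_cons]
        rw [← hflt]
        exact PySem.List.sorted_eq_of_perm_of_pairwise_lt _ _ _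
          (hperm.filter _) (hpair.filter _)
      have hchain : List.IsChain (· < ·) (a :: rest) := List.isChain_iff_pairwise.mpr hpair
      have hranges := foldlA_genRuns rest [] a a
      simp only [List.nil_append] at hranges
      dsimp only
      rw [hranges, genRuns_char rest a a hchain, hstarts,
        foldl_pair_append
          (fun s => pvFmtB ((s - 1) * 60) ++ "–" ++
            pvFmtB (pvRunE (PySem.Set.ofList hours) (PySem.Set.ofList hours).length s * 60))
          (fun s => if s != pvRunE (PySem.Set.ofList hours) (PySem.Set.ofList hours).length s
            then PySem.Int.toStr s ++ "–" ++
              PySem.Int.toStr (pvRunE (PySem.Set.ofList hours) (PySem.Set.ofList hours).length s)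
            else PySem.Int.toStr s)]
      dsimp only
      rw [pvFmtA_eq_pvFmtB]
      refine Prod.ext ?_ (Prod.ext ?_ ?_)
      · dsimp only
        refine congrArg (PySem.Str.join " + ") ?_
        rw [List.map_cons, List.map_cons, List.map_map, List.nil_append]
        refine congrArg₂ (· :: ·) ?_ ?_
        · rw [hend a (le_refl a)]
        · apply List.map_congr_left
          intro s' hs'
          have hs't : s' ∈ rest := List.mem_of_mem_filter hs'
          rw [Function.comp_apply, hend s' (le_of_lt (halt s' hs't))]
      · dsimp only
        refine congrArg (PySem.Str.join ", ") ?_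
        rw [List.map_cons, List.map_cons, List.map_map, List.nil_append]
        refine congrArg₂ (· :: ·) ?_ ?_
        · rw [hend a (le_refl a)]
        · apply List.map_congr_left
          intro s' hs'
          have hs't : s' ∈ rest := List.mem_of_mem_filter hs'
          rw [Function.comp_apply, hend s' (le_of_lt (halt s' hs't))]
      · dsimp only
        rw [← genRuns_char rest a a hchain, sum_genRuns rest a a 0, hlenP]
        push_cast
        ring
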